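-- pv_equiv track=rewrite | github.com/BAIGUANGMEI/system_scheduling | App/Algorithm/SA.py | transform_staff
-- ===== SOURCE A (Python) =====
-- def transform_staff(ans, num_staff):
--     schedule = {}
--     for n in range(num_staff):
--         pre = []
--         for i in range(len(ans)):
--             for j in range(len(ans[i])):
--                 if n in ans[i][j]:
--                     pre.append([i, j])
--         schedule['staff' + str(n + 1)] = pre
--
--     return schedule
-- ===== SOURCE B (Python) =====
-- def transform_staff(ans, num_staff):
--     # One pass over the grid: append each cell position to every listed staff's
--     # pre-initialized bucket, instead of rescanning the whole grid per staff.
--     pos = {n: [] for n in range(num_staff)}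
--     for i, row in enumerate(ans):
--         for j, cell in enumerate(row):
--             for n in dict.fromkeys(cell):
--                 if n in pos:
--                     pos[n].append([i, j])
--     return {'staff' + str(n + 1): pos[n] for n in range(num_staff)}
-- ===== Notes on version B (the rewrite author's own statement) =====
-- stated objective: faster
-- what changed: Inverted the loop nesting: instead of rescanning the whole grid once per staff member, B makes a single pass over the grid and appends each cell position to the pre-initialized bucket of every staff index listed in that cell.
import Mathlib
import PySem

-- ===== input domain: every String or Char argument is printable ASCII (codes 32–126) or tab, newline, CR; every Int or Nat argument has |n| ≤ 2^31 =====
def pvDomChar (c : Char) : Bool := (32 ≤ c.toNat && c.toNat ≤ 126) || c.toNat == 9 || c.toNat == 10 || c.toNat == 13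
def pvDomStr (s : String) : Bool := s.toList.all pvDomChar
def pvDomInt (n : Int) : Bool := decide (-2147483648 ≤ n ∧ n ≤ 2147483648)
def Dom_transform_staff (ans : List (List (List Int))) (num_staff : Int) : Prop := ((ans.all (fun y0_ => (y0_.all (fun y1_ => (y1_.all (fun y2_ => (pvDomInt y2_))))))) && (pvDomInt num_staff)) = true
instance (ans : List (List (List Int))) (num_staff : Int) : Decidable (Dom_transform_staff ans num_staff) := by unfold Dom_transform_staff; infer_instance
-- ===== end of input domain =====

-- B inverts the loop nesting: one pass over the grid filling pre-initialized per-staff buckets,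
-- instead of rescanning the whole grid once per staff member (objective: faster).


-- ===== PORT A =====
def transform_staff (ans : List (List (List Int))) (num_staff : Int) : List (String × List (List Int)) :=
  ((PySem.List.pyRange 0 num_staff 1).foldl (fun schedule n =>
      let pre := (PySem.List.pyRange 0 (PySem.List.len ans) 1).foldl (fun pre i =>
          (PySem.List.pyRange 0 (PySem.List.len (PySem.List.pyGetD ans i [])) 1).foldl (fun pre j =>
              if n ∈ PySem.List.pyGetD (PySem.List.pyGetD ans i []) j [] then pre ++ [[i, j]] else pre)
            pre)
        []
      schedule.insert ("staff" ++ PySem.Int.toStr (n + 1)) pre)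
    PySem.Dict.empty).items

-- ===== PORT B =====
def transform_staff_alt (ans : List (List (List Int))) (num_staff : Int) : List (String × List (List Int)) :=
  let pos0 : PySem.Dict Int (List (List Int)) :=
    (PySem.List.pyRange 0 num_staff 1).foldl (fun d n => d.insert n []) PySem.Dict.empty
  let pos :=
    (PySem.List.enumerate ans).foldl (fun pos p =>
      (PySem.List.enumerate p.2).foldl (fun pos q =>
        (PySem.Set.ofList q.2).foldl (fun pos n =>
          if pos.contains n then pos.modify n [] (· ++ [[p.1, q.1]]) else pos) pos) pos) pos0
  ((PySem.List.pyRange 0 num_staff 1).foldl (fun d n =>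
      d.insert ("staff" ++ PySem.Int.toStr (n + 1)) (pos.getD n [])) PySem.Dict.empty).items

-- ===== PRECONDITION & SPEC =====
def Spec_transform_staff (ans : List (List (List Int))) (num_staff : Int) (out : List (String × List (List Int))) : Prop := out = transform_staff_alt ans num_staff
instance (ans : List (List (List Int))) (num_staff : Int) (out : List (String × List (List Int))) : Decidable (Spec_transform_staff ans num_staff out) := by unfold Spec_transform_staff; infer_instance

-- ===== CLAIM (what is proved, stated in full; the proofs are below) =====
def Claim_equal_transform_staff : Prop := ∀ (ans : List (List (List Int))) (num_staff : Int), Dom_transform_staff ans num_staff → Spec_transform_staff ans num_staff (transform_staff ans num_staff)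

-- ===== LEMMAS AND PROOFS =====

-- Closed form of the positions of staff index n: both ports' per-staff lists equal this.
def pvPos (ans : List (List (List Int))) (n : Int) : List (List Int) :=
  (PySem.List.enumerate ans).flatMap (fun p =>
    ((PySem.List.enumerate p.2).filter (fun q => decide (n ∈ q.2))).map (fun q => [p.1, q.1]))

theorem pv_rowfold (n i : Int) (cells : List (Int × List Int)) (acc : List (List Int)) :
    cells.foldl (fun pre q => if n ∈ q.2 then pre ++ [[i, q.1]] else pre) acc
    = acc ++ (cells.filter (fun q => decide (n ∈ q.2))).map (fun q => [i, q.1]) := by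
  induction cells generalizing acc with
  | nil => simp
  | cons q cs ih =>
    by_cases h : n ∈ q.2 <;> simp [h, ih, List.filter_cons]

theorem pv_gridfold (n : Int) (rows : List (Int × List (List Int))) (acc : List (List Int)) :
    rows.foldl (fun pre p => (PySem.List.enumerate p.2).foldl
        (fun pre q => if n ∈ q.2 then pre ++ [[p.1, q.1]] else pre) pre) acc
    = acc ++ rows.flatMap (fun p =>
        ((PySem.List.enumerate p.2).filter (fun q => decide (n ∈ q.2))).map (fun q => [p.1, q.1])) := by
  induction rows generalizing acc with
  | nil => simp
  | cons p ps ih => simp [ih, pv_rowfold, List.append_assoc, List.flatMap_def]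

theorem pv_preA_eq (ans : List (List (List Int))) (n : Int) :
    (PySem.List.pyRange 0 (PySem.List.len ans) 1).foldl (fun pre i =>
        (PySem.List.pyRange 0 (PySem.List.len (PySem.List.pyGetD ans i [])) 1).foldl (fun pre j =>
            if n ∈ PySem.List.pyGetD (PySem.List.pyGetD ans i []) j [] then pre ++ [[i, j]] else pre)
          pre) []
    = pvPos ans n := by
  calc (PySem.List.pyRange 0 (PySem.List.len ans) 1).foldl (fun pre i =>
        (PySem.List.pyRange 0 (PySem.List.len (PySem.List.pyGetD ans i [])) 1).foldl (fun pre j =>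
            if n ∈ PySem.List.pyGetD (PySem.List.pyGetD ans i []) j [] then pre ++ [[i, j]] else pre)
          pre) []
      = (PySem.List.enumerate ans).foldl (fun pre p =>
          (PySem.List.pyRange 0 (PySem.List.len p.2) 1).foldl (fun pre j =>
              if n ∈ PySem.List.pyGetD p.2 j [] then pre ++ [[p.1, j]] else pre) pre) [] := by
        rw [PySem.List.enumerate_eq_map_pyRange ans ([] : List (List Int)), List.foldl_map]
    _ = (PySem.List.enumerate ans).foldl (fun pre p =>
          (PySem.List.enumerate p.2).foldl (fun pre q =>
              if n ∈ q.2 then pre ++ [[p.1, q.1]] else pre) pre) [] := by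
        apply PySem.List.foldl_congr_mem
        intro acc p _
        rw [PySem.List.enumerate_eq_map_pyRange p.2 ([] : List Int), List.foldl_map]
    _ = pvPos ans n := by rw [pv_gridfold]; rfl

theorem pv_contains_cellfold (v : List Int) (l : List Int) (pos : PySem.Dict Int (List (List Int))) (k : Int) :
    ((l.foldl (fun pos n => if pos.contains n then pos.modify n [] (· ++ [v]) else pos) pos).contains k)
      = pos.contains k := by
  induction l generalizing pos with
  | nil => rfl
  | cons a l ih =>
    simp only [List.foldl_cons]
    rw [ih]
    by_cases h : pos.contains a <;> by_cases hk : k = a <;>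
      simp [h, hk, PySem.Dict.contains_modify]

theorem pv_contains_foldl_pres {α : Type} (f : PySem.Dict Int (List (List Int)) → α → PySem.Dict Int (List (List Int)))
    (k : Int) (h : ∀ pos x, (f pos x).contains k = pos.contains k) :
    ∀ (l : List α) (pos), ((l.foldl f pos).contains k) = pos.contains k := by
  intro l
  induction l with
  | nil => intro pos; rfl
  | cons a l ih => intro pos; simp only [List.foldl_cons]; rw [ih, h]

theorem pv_getD_cellfold (v : List Int) (l : List Int) (hl : l.Nodup)
    (pos : PySem.Dict Int (List (List Int))) (k : Int) :
    (l.foldl (fun pos n => if pos.contains n then pos.modify n [] (· ++ [v]) else pos) pos).getD k []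
    = pos.getD k [] ++ (if pos.contains k = true ∧ k ∈ l then [v] else []) := by
  induction l generalizing pos with
  | nil => simp
  | cons a l ih =>
    obtain ⟨ha, hl'⟩ := List.nodup_cons.mp hl
    simp only [List.foldl_cons]
    by_cases h : pos.contains a = true
    · rw [if_pos h, ih hl', PySem.Dict.getD_modify]
      by_cases hk : k = a
      · subst hk
        simp [h, ha, PySem.Dict.contains_modify]
      · simp [hk, PySem.Dict.contains_modify, List.mem_cons]
    · rw [if_neg h, ih hl']
      by_cases hk : k = a
      · subst hk; simp [h]
      · simp [hk, List.mem_cons]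

theorem pv_getD_rowfold (i : Int) (cells : List (Int × List Int))
    (pos : PySem.Dict Int (List (List Int))) (k : Int) :
    (cells.foldl (fun pos q => (PySem.Set.ofList q.2).foldl
        (fun pos n => if pos.contains n then pos.modify n [] (· ++ [[i, q.1]]) else pos) pos) pos).getD k []
    = pos.getD k [] ++ (if pos.contains k = true
        then (cells.filter (fun q => decide (k ∈ q.2))).map (fun q => [i, q.1]) else []) := by
  induction cells generalizing pos with
  | nil => simp
  | cons q cs ih =>
    simp only [List.foldl_cons]
    rw [ih, pv_getD_cellfold _ _ (PySem.Set.nodup_ofList _), pv_contains_cellfold]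
    by_cases h : pos.contains k = true
    · by_cases hm : k ∈ q.2 <;>
        simp [h, hm, PySem.Set.mem_ofList, List.filter_cons, List.append_assoc]
    · simp [h]

theorem pv_getD_gridfold (rows : List (Int × List (List Int)))
    (pos : PySem.Dict Int (List (List Int))) (k : Int) :
    (rows.foldl (fun pos p => (PySem.List.enumerate p.2).foldl (fun pos q =>
        (PySem.Set.ofList q.2).foldl
          (fun pos n => if pos.contains n then pos.modify n [] (· ++ [[p.1, q.1]]) else pos) pos) pos) pos).getD k []
    = pos.getD k [] ++ (if pos.contains k = true
        then rows.flatMap (fun p =>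
          ((PySem.List.enumerate p.2).filter (fun q => decide (k ∈ q.2))).map (fun q => [p.1, q.1])) else []) := by
  induction rows generalizing pos with
  | nil => simp
  | cons p ps ih =>
    simp only [List.foldl_cons]
    rw [ih, pv_getD_rowfold]
    rw [pv_contains_foldl_pres _ k (fun pos q => pv_contains_cellfold _ _ pos k)]
    by_cases h : pos.contains k = true <;> simp [h, List.append_assoc]

theorem pv_contains_pos0 (num_staff k : Int) :
    ((PySem.List.pyRange 0 num_staff 1).foldl
        (fun d n => d.insert n ([] : List (List Int))) PySem.Dict.empty).contains k
    = decide (k ∈ PySem.List.pyRange 0 num_staff 1) := by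
  rw [PySem.Dict.contains_eq_decide_mem_keys,
    PySem.Dict.keys_foldl_insert _ (fun _ _ => ([] : List (List Int)))]
  simp [PySem.Dict.keys_empty, PySem.Set.update_nil_left, PySem.Set.mem_ofList]

theorem pv_getD_foldl_insert_const (l : List Int) (d : PySem.Dict Int (List (List Int)))
    (h : ∀ k, d.getD k [] = []) (k : Int) :
    (l.foldl (fun d n => d.insert n []) d).getD k [] = [] := by
  induction l generalizing d with
  | nil => exact h k
  | cons a l ih =>
    simp only [List.foldl_cons]
    apply ih
    intro k'
    rw [PySem.Dict.getD_insert]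
    split
    · rfl
    · exact h k'

-- ===== VERDICT (by name: the statement is the Claim_ definition above) =====
theorem transform_staff_spec : Claim_equal_transform_staff := by
  intro ans num_staff _
  unfold Spec_transform_staff transform_staff transform_staff_alt
  apply congrArg PySem.Dict.items
  apply PySem.List.foldl_congr_mem
  intro acc n hn
  congr 1
  rw [pv_preA_eq, pv_getD_gridfold, pv_getD_foldl_insert_const _ _ (fun k => PySem.Dict.getD_empty k []),
    pv_contains_pos0]
  simp [hn, pvPos]
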